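-- pv_equiv track=rewrite | github.com/tomru112345/SeatManage | program/Sort_Students.py | setlist_ID
-- ===== SOURCE A (Python) =====
-- def setlist_ID(student_list):
--     """リストの活用"""
--     School_year_ID = []
--     student_list_keys = list(student_list[0].keys())  # Excel の表のキー取得
--     for i in student_list:
--         t = str(i[student_list_keys[0]])
--         School_year_ID.append(t[0:2])
--     School_year_ID = list(set(School_year_ID))
--     School_year_ID.sort()
--     return School_year_ID
-- ===== SOURCE B (Python) =====
-- def _insert_unique(res, p):
--     """Insert p into the sorted duplicate-free list res, keeping it sorted and duplicate-free."""
--     if not res: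
--         return [p]
--     if p < res[0]:
--         return [p] + res
--     if p == res[0]:
--         return res
--     return [res[0]] + _insert_unique(res[1:], p)
--
--
-- def setlist_ID(student_list):
--     """Maintain a sorted duplicate-free list of 2-char ID prefixes by ordered insertion; no set, no sort."""
--     student_list_keys = list(student_list[0].keys())
--     key = student_list_keys[0]
--     result = []
--     for i in student_list:
--         result = _insert_unique(result, str(i[key])[0:2])
--     return result
-- ===== Notes on version B (the rewrite author's own statement) =====
-- stated objective: alternative
-- what changed: Replaces A's collect-all/set-dedup/sort pipeline with a single fold that maintains a sorted duplicate-free list via ordered insertion (no set, no sort call).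
import Mathlib
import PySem

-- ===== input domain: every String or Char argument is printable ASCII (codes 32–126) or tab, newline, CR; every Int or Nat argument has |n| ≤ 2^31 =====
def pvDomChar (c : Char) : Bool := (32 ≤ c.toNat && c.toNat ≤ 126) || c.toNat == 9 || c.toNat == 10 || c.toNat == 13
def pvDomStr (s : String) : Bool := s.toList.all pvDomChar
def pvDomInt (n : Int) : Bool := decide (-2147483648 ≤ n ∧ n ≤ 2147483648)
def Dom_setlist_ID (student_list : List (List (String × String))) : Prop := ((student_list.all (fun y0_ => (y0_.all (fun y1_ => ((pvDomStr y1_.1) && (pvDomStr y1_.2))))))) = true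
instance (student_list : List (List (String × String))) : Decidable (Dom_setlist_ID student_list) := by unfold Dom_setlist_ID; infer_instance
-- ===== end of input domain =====

-- B replaces A's collect-all/set-dedup/sort pipeline with a single fold maintaining a
-- sorted duplicate-free list via ordered insertion (no set, no sort call).

-- ===== PORT A =====
def setlist_ID (student_list : List (List (String × String))) : List String :=
  match PySem.List.pyGet? student_list 0 with
  | none => []          -- student_list[0]: IndexError, excluded by Pre_
  | some d0 =>
    match PySem.List.pyGet? (PySem.Dict.keys ⟨d0⟩) 0 with
    | none => []        -- student_list_keys[0]: IndexError, excluded by Pre_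
    | some key =>
      let school_year_ID := student_list.foldl (fun acc i =>
        match PySem.Dict.get? ⟨i⟩ key with
        | none => acc   -- i[key]: KeyError, excluded by Pre_
        | some t => acc ++ [PySem.Str.slice t (some 0) (some 2)]) []
      PySem.List.sorted (PySem.Set.ofList school_year_ID) (fun x => x) false

-- ===== PORT B =====
-- _insert_unique: insert p into the sorted duplicate-free list, keeping it so.
def pvInsertUnique : List String → String → List String
  | [], p => [p]
  | x :: xs, p =>
    if p < x then p :: x :: xs
    else if p = x then x :: xs
    else x :: pvInsertUnique xs p

def setlist_ID_alt (student_list : List (List (String × String))) : List String :=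
  match PySem.List.pyGet? student_list 0 with
  | none => []          -- student_list[0]: IndexError, excluded by Pre_
  | some d0 =>
    match PySem.List.pyGet? (PySem.Dict.keys ⟨d0⟩) 0 with
    | none => []        -- student_list_keys[0]: IndexError, excluded by Pre_
    | some key =>
      student_list.foldl (fun result i =>
        match PySem.Dict.get? ⟨i⟩ key with
        | none => result   -- i[key]: KeyError, excluded by Pre_
        | some t => pvInsertUnique result (PySem.Str.slice t (some 0) (some 2))) []

-- ===== PRECONDITION & SPEC =====
-- Pre_ excludes exactly the inputs where Python A raises: an empty list (IndexError on
-- student_list[0]), an empty first dict (IndexError on keys[0]), or a later dict missing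
-- the first dict's first key (KeyError).
def Pre_setlist_ID (student_list : List (List (String × String))) : Prop :=
  student_list ≠ [] ∧ student_list.headD [] ≠ [] ∧
    ∀ d ∈ student_list,
      (PySem.Dict.get? (⟨d⟩ : PySem.Dict String String)
        ((student_list.headD []).headD ("", "")).1).isSome = true
instance (student_list : List (List (String × String))) : Decidable (Pre_setlist_ID student_list) := by unfold Pre_setlist_ID; infer_instance
def pvWitness_setlist_ID : (List (List (String × String))) :=
  [[("id", "10a"), ("nm", "x")], [("id", "21b")], [("id", "10c")]]
def Spec_setlist_ID (student_list : List (List (String × String))) (out : List String) : Prop := out = setlist_ID_alt student_list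
instance (student_list : List (List (String × String))) (out : List String) : Decidable (Spec_setlist_ID student_list out) := by unfold Spec_setlist_ID; infer_instance

-- ===== CLAIM (what is proved, stated in full; the proofs are below) =====
def Claim_equal_setlist_ID : Prop := ∀ (student_list : List (List (String × String))), Dom_setlist_ID student_list → Pre_setlist_ID student_list → Spec_setlist_ID student_list (setlist_ID student_list)

-- ===== LEMMAS AND PROOFS =====

-- Inserting into a strictly sorted list keeps it strictly sorted and adds p to its members.
theorem pvInsertUnique_spec (res : List String) (p : String) (h : res.Pairwise (· < ·)) :
    (pvInsertUnique res p).Pairwise (· < ·) ∧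
      ∀ x, x ∈ pvInsertUnique res p ↔ x ∈ res ∨ x = p := by
  induction res with
  | nil => simp [pvInsertUnique]
  | cons y ys ih =>
    have hy : ∀ z ∈ ys, y < z := (List.pairwise_cons.mp h).1
    have ihr := ih h.tail
    by_cases h1 : p < y
    · refine ⟨?_, ?_⟩
      · simp only [pvInsertUnique, if_pos h1]
        exact List.pairwise_cons.mpr ⟨by
          intro z hz
          rcases List.mem_cons.mp hz with rfl | hz
          · exact h1
          · exact lt_trans h1 (hy z hz), h⟩
      · intro x; simp only [pvInsertUnique, if_pos h1, List.mem_cons]; tauto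
    · by_cases h2 : p = y
      · subst h2
        refine ⟨by simpa [pvInsertUnique, h1] using h, ?_⟩
        intro x; simp only [List.mem_cons]; simp [pvInsertUnique]; tauto
      · have h3 : y < p := lt_of_le_of_ne (not_lt.mp h1) (Ne.symm h2)
        refine ⟨?_, ?_⟩
        · simp only [pvInsertUnique, if_neg h1, if_neg h2]
          refine List.pairwise_cons.mpr ⟨?_, ihr.1⟩
          intro z hz
          rcases (ihr.2 z).mp hz with hz | rfl
          · exact hy z hz
          · exact h3
        · intro x
          simp only [pvInsertUnique, if_neg h1, if_neg h2, List.mem_cons, ihr.2]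
          tauto

-- The fold over the remaining rows, started from any strictly sorted accumulator,
-- stays strictly sorted and collects exactly the prefixes of rows whose lookup succeeds.
theorem pvFoldIns_spec (key : String) (xs : List (List (String × String)))
    (acc : List String) (hacc : acc.Pairwise (· < ·)) :
    (xs.foldl (fun result i =>
        match PySem.Dict.get? (⟨i⟩ : PySem.Dict String String) key with
        | none => result
        | some t => pvInsertUnique result (PySem.Str.slice t (some 0) (some 2))) acc).Pairwise (· < ·) ∧
    ∀ x, x ∈ xs.foldl (fun result i =>
        match PySem.Dict.get? (⟨i⟩ : PySem.Dict String String) key with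
        | none => result
        | some t => pvInsertUnique result (PySem.Str.slice t (some 0) (some 2))) acc ↔
      x ∈ acc ∨ ∃ i ∈ xs, ∃ t, PySem.Dict.get? (⟨i⟩ : PySem.Dict String String) key = some t ∧
        x = PySem.Str.slice t (some 0) (some 2) := by
  induction xs generalizing acc with
  | nil => exact ⟨hacc, fun x => by simp⟩
  | cons r rs ih =>
    simp only [List.foldl_cons]
    cases hr : PySem.Dict.get? (⟨r⟩ : PySem.Dict String String) key with
    | none =>
      have := ih acc hacc
      refine ⟨this.1, fun x => ?_⟩
      rw [this.2]
      constructor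
      · rintro (hx | ⟨i, hi, t, ht, rfl⟩)
        · exact Or.inl hx
        · exact Or.inr ⟨i, List.mem_cons_of_mem _ hi, t, ht, rfl⟩
      · rintro (hx | ⟨i, hi, t, ht, rfl⟩)
        · exact Or.inl hx
        · rcases List.mem_cons.mp hi with rfl | hi
          · rw [hr] at ht; cases ht
          · exact Or.inr ⟨i, hi, t, ht, rfl⟩
    | some t0 =>
      have hins := pvInsertUnique_spec acc (PySem.Str.slice t0 (some 0) (some 2)) hacc
      have := ih _ hins.1
      refine ⟨this.1, fun x => ?_⟩
      rw [this.2]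
      constructor
      · rintro (hx | ⟨i, hi, t, ht, rfl⟩)
        · rcases (hins.2 x).mp hx with hx | rfl
          · exact Or.inl hx
          · exact Or.inr ⟨r, List.mem_cons_self .., t0, hr, rfl⟩
        · exact Or.inr ⟨i, List.mem_cons_of_mem _ hi, t, ht, rfl⟩
      · rintro (hx | ⟨i, hi, t, ht, rfl⟩)
        · exact Or.inl ((hins.2 x).mpr (Or.inl hx))
        · rcases List.mem_cons.mp hi with rfl | hi
          · rw [hr] at ht; injection ht with ht; subst ht
            exact Or.inl ((hins.2 _).mpr (Or.inr rfl))
          · exact Or.inr ⟨i, hi, t, ht, rfl⟩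

-- A's append-loop collects exactly the same prefixes (as a multiset list).
theorem pvFoldl_append_mem (key : String) (xs : List (List (String × String))) (acc : List String) :
    ∀ x, x ∈ xs.foldl (fun acc i =>
        match PySem.Dict.get? (⟨i⟩ : PySem.Dict String String) key with
        | none => acc
        | some t => acc ++ [PySem.Str.slice t (some 0) (some 2)]) acc ↔
      x ∈ acc ∨ ∃ i ∈ xs, ∃ t, PySem.Dict.get? (⟨i⟩ : PySem.Dict String String) key = some t ∧
        x = PySem.Str.slice t (some 0) (some 2) := by
  induction xs generalizing acc with
  | nil => simp
  | cons r rs ih =>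
    intro x
    simp only [List.foldl_cons]
    cases hr : PySem.Dict.get? (⟨r⟩ : PySem.Dict String String) key with
    | none =>
      rw [ih]
      constructor
      · rintro (hx | ⟨i, hi, t, ht, rfl⟩)
        · exact Or.inl hx
        · exact Or.inr ⟨i, List.mem_cons_of_mem _ hi, t, ht, rfl⟩
      · rintro (hx | ⟨i, hi, t, ht, rfl⟩)
        · exact Or.inl hx
        · rcases List.mem_cons.mp hi with rfl | hi
          · rw [hr] at ht; cases ht
          · exact Or.inr ⟨i, hi, t, ht, rfl⟩
    | some t0 =>
      rw [ih]
      simp only [List.mem_append, List.mem_singleton]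
      constructor
      · rintro ((hx | rfl) | ⟨i, hi, t, ht, rfl⟩)
        · exact Or.inl hx
        · exact Or.inr ⟨r, List.mem_cons_self .., t0, hr, rfl⟩
        · exact Or.inr ⟨i, List.mem_cons_of_mem _ hi, t, ht, rfl⟩
      · rintro (hx | ⟨i, hi, t, ht, rfl⟩)
        · exact Or.inl (Or.inl hx)
        · rcases List.mem_cons.mp hi with rfl | hi
          · rw [hr] at ht; injection ht with ht; subst ht
            exact Or.inl (Or.inr rfl)
          · exact Or.inr ⟨i, hi, t, ht, rfl⟩

theorem pvMain_eq (key : String) (sl : List (List (String × String))) :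
    PySem.List.sorted (PySem.Set.ofList (sl.foldl (fun acc i =>
        match PySem.Dict.get? (⟨i⟩ : PySem.Dict String String) key with
        | none => acc
        | some t => acc ++ [PySem.Str.slice t (some 0) (some 2)]) [])) (fun x => x) false
    = sl.foldl (fun result i =>
        match PySem.Dict.get? (⟨i⟩ : PySem.Dict String String) key with
        | none => result
        | some t => pvInsertUnique result (PySem.Str.slice t (some 0) (some 2))) [] := by
  have hb := pvFoldIns_spec key sl [] List.Pairwise.nil
  apply PySem.List.sorted_eq_of_perm_of_pairwise_lt
  · apply (List.perm_ext_iff_of_nodup (hb.1.imp (fun h => ne_of_lt h)) (PySem.Set.nodup_ofList _)).mpr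
    intro x
    rw [hb.2 x, PySem.Set.mem_ofList, pvFoldl_append_mem]
  · exact hb.1

-- ===== VERDICT (by name: the statement is the Claim_ definition above) =====
theorem setlist_ID_spec : Claim_equal_setlist_ID := by
  intro sl _ _
  unfold Spec_setlist_ID setlist_ID setlist_ID_alt
  cases h1 : PySem.List.pyGet? sl 0 with
  | none => rfl
  | some d0 =>
    dsimp only
    cases h2 : PySem.List.pyGet? (PySem.Dict.keys (⟨d0⟩ : PySem.Dict String String)) 0 with
    | none => rfl
    | some key => exact pvMain_eq key sl
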